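-- pv_equiv track=rewrite | github.com/AhmedKahlaoui/Automobiles-specifications-API | services/car_service.py | reorder_car_spec
-- ===== SOURCE A (Python) =====
-- from collections import OrderedDict
--
-- def reorder_car_spec(spec_dict):
--     """
--     Reorder car specification fields with important ones first.
--     Puts brand/company, model/serie, and year at the top for easy visibility.
--     """
--     if not spec_dict:
--         return spec_dict
--
--     # Define priority field names (in order they should appear)
--     priority_fields = ['Company', 'Brand', 'Model', 'Serie', 'Production Years', 'Body style']
--
--     ordered = OrderedDict()
--
--     # Add priority fields first (if they exist)
--     for field in priority_fields:
--         if field in spec_dict: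
--             ordered[field] = spec_dict[field]
--
--     # Add remaining fields in their original order, excluding priority fields
--     for key, value in spec_dict.items():
--         if key not in ordered:
--             ordered[key] = value
--
--     return dict(ordered)
-- ===== SOURCE B (Python) =====
-- def reorder_car_spec(spec_dict):
--     """Bucket pass: one scan distributes items into rank buckets, then concatenate."""
--     if not spec_dict:
--         return spec_dict
--     priority_fields = ['Company', 'Brand', 'Model', 'Serie', 'Production Years', 'Body style']
--     rank = {f: i for i, f in enumerate(priority_fields)}
--     buckets = [[] for _ in range(len(priority_fields) + 1)]
--     for key, value in spec_dict.items():
--         buckets[rank.get(key, len(priority_fields))].append((key, value))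
--     return {k: v for bucket in buckets for k, v in bucket}
-- ===== Notes on version B (the rewrite author's own statement) =====
-- stated objective: alternative
-- what changed: A builds an OrderedDict in two passes (one scan over the priority-field list with lookups, then a scan over the items with membership tests against the partially built dict); B makes a single bucket-distribution pass assigning each item to its rank bucket and concatenates the buckets.
import Mathlib
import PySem

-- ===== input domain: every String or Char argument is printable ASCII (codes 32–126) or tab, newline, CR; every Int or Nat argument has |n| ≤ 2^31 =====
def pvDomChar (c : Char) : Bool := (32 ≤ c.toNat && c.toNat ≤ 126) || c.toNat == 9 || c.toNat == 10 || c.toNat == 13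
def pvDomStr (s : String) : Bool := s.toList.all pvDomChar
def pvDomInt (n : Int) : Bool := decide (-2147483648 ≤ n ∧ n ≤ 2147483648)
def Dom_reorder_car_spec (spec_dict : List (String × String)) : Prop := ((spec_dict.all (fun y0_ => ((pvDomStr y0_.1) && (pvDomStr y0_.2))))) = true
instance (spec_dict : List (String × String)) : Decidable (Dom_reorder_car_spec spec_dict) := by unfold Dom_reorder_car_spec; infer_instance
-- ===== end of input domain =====

-- B replaces A's two OrderedDict-building passes by a single bucket-distribution pass
-- (rank buckets, then concatenate); objective: alternative (single pass, no membership test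
-- against the partially built dict).

-- ===== PORT A =====
def pvPriorityFields : List String :=
  ["Company", "Brand", "Model", "Serie", "Production Years", "Body style"]

def reorder_car_spec (spec_dict : List (String × String)) : List (String × String) :=
  if spec_dict.isEmpty then spec_dict else
    let d : PySem.Dict String String := PySem.Dict.mk spec_dict
    -- for field in priority_fields: if field in spec_dict: ordered[field] = spec_dict[field]
    let ordered : PySem.Dict String String :=
      pvPriorityFields.foldl (fun o field =>
        match d.get? field with
        | some v => o.insert field v
        | none => o) PySem.Dict.empty
    -- for key, value in spec_dict.items(): if key not in ordered: ordered[key] = value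
    let ordered := spec_dict.foldl (fun o kv =>
        if o.contains kv.1 then o else o.insert kv.1 kv.2) ordered
    ordered.items

-- ===== PORT B =====
-- rank = {f: i for i, f in enumerate(priority_fields)}
def pvRank : PySem.Dict String Int :=
  (PySem.List.enumerate pvPriorityFields).foldl (fun r p => r.insert p.2 p.1) PySem.Dict.empty

def reorder_car_spec_alt (spec_dict : List (String × String)) : List (String × String) :=
  if spec_dict.isEmpty then spec_dict else
    -- buckets = [[] for _ in range(len(priority_fields) + 1)]
    let buckets : List (List (String × String)) := List.replicate 7 []
    -- for key, value in spec_dict.items(): buckets[rank.get(key, 6)].append((key, value))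
    let buckets := spec_dict.foldl (fun bs kv =>
        let i := (pvRank.getD kv.1 6).toNat   -- rank values are 0..6, never negative
        bs.set i (bs.getD i [] ++ [kv])) buckets
    -- return {k: v for bucket in buckets for k, v in bucket}
    (buckets.flatten.foldl (fun (d : PySem.Dict String String) kv => d.insert kv.1 kv.2)
      PySem.Dict.empty).items

-- ===== PRECONDITION & SPEC =====
-- Pre_ excludes association lists with duplicate keys: they do not represent a Python dict
-- (the callers pass a dict), and the two ports make different arbitrary choices there.
def Pre_reorder_car_spec (spec_dict : List (String × String)) : Prop :=
  (spec_dict.map Prod.fst).Nodup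
instance (spec_dict : List (String × String)) : Decidable (Pre_reorder_car_spec spec_dict) := by
  unfold Pre_reorder_car_spec; infer_instance

def pvWitness_reorder_car_spec : (List (String × String)) :=
  [("Model", "Mustang"), ("Engine", "V8"), ("Company", "Ford")]

def Spec_reorder_car_spec (spec_dict : List (String × String)) (out : List (String × String)) : Prop := out = reorder_car_spec_alt spec_dict
instance (spec_dict : List (String × String)) (out : List (String × String)) : Decidable (Spec_reorder_car_spec spec_dict out) := by unfold Spec_reorder_car_spec; infer_instance

-- ===== CLAIM (what is proved, stated in full; the proofs are below) =====
def Claim_equal_reorder_car_spec : Prop := ∀ (spec_dict : List (String × String)), Dom_reorder_car_spec spec_dict → Pre_reorder_car_spec spec_dict → Spec_reorder_car_spec spec_dict (reorder_car_spec spec_dict)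

-- ===== LEMMAS AND PROOFS =====

-- the common normal form both ports reach
def pvPrio (d : PySem.Dict String String) : List (String × String) :=
  pvPriorityFields.filterMap (fun f => (d.get? f).map (fun v => (f, v)))

def pvCanon (spec_dict : List (String × String)) : List (String × String) :=
  pvPrio (PySem.Dict.mk spec_dict) ++
    spec_dict.filter (fun kv => !decide (kv.1 ∈ pvPriorityFields))

-- rank lookup as a plain function
def pvRk (x : String) : Nat :=
  if x = "Company" then 0 else if x = "Brand" then 1 else if x = "Model" then 2
  else if x = "Serie" then 3 else if x = "Production Years" then 4
  else if x = "Body style" then 5 else 6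

lemma pvRank_unfold : pvRank =
    ((((((PySem.Dict.empty.insert "Company" 0).insert "Brand" 1).insert "Model" 2).insert
      "Serie" 3).insert "Production Years" 4).insert "Body style" 5) := by decide

lemma rk_eq (x : String) : (pvRank.getD x 6).toNat = pvRk x := by
  by_cases h1 : x = "Company"
  · subst h1; decide
  by_cases h2 : x = "Brand"
  · subst h2; decide
  by_cases h3 : x = "Model"
  · subst h3; decide
  by_cases h4 : x = "Serie"
  · subst h4; decide
  by_cases h5 : x = "Production Years"
  · subst h5; decide
  by_cases h6 : x = "Body style"
  · subst h6; decide
  rw [pvRank_unfold, PySem.Dict.getD_insert, if_neg h6, PySem.Dict.getD_insert, if_neg h5,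
      PySem.Dict.getD_insert, if_neg h4, PySem.Dict.getD_insert, if_neg h3,
      PySem.Dict.getD_insert, if_neg h2, PySem.Dict.getD_insert, if_neg h1,
      PySem.Dict.getD_empty]
  unfold pvRk
  simp [h1, h2, h3, h4, h5, h6]

lemma rk_lt (x : String) : pvRk x < 7 := by
  unfold pvRk; split_ifs <;> omega

-- A's first loop (conditional inserts of fresh keys) appends the present priority pairs
lemma phase1_items (fields : List String) (d o : PySem.Dict String String)
    (hf : fields.Nodup) (ho : ∀ f ∈ fields, o.contains f = false) :
    (fields.foldl (fun o field =>
        match d.get? field with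
        | some v => o.insert field v
        | none => o) o).items
      = o.items ++ fields.filterMap (fun f => (d.get? f).map (fun v => (f, v))) := by
  induction fields generalizing o with
  | nil => simp
  | cons f rest ih =>
    obtain ⟨hfr, hrest⟩ := List.nodup_cons.mp hf
    simp only [List.foldl_cons, List.filterMap_cons]
    cases hd : d.get? f with
    | none =>
      simp only [Option.map_none]
      exact ih o hrest (fun g hg => ho g (List.mem_cons_of_mem _ hg))
    | some v =>
      simp only [Option.map_some]
      rw [ih (o.insert f v) hrest ?_]
      · rw [PySem.Dict.items_insert_of_not_contains o v (ho f (List.mem_cons_self ..))]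
        simp
      · intro g hg
        have hne : g ≠ f := fun e => hfr (e ▸ hg)
        rw [PySem.Dict.contains_insert]
        simp [hne, ho g (List.mem_cons_of_mem _ hg)]

-- A's second loop appends the pairs whose key the dict does not yet contain
lemma phase2_items (l : List (String × String)) (o : PySem.Dict String String)
    (h : (l.map Prod.fst).Nodup) :
    (l.foldl (fun o kv => if o.contains kv.1 then o else o.insert kv.1 kv.2) o).items
      = o.items ++ l.filter (fun kv => !o.contains kv.1) := by
  induction l generalizing o with
  | nil => simp
  | cons kv t ih =>
    simp only [List.map_cons] at h
    obtain ⟨hk, ht⟩ := List.nodup_cons.mp h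
    simp only [List.foldl_cons, List.filter_cons]
    cases hc : o.contains kv.1 with
    | true => simp [ih o ht]
    | false =>
      rw [if_neg (by simp_all), ih (o.insert kv.1 kv.2) ht,
          PySem.Dict.items_insert_of_not_contains _ _ hc,
          List.filter_congr (q := fun kv' => !o.contains kv'.1) ?_]
      · simp
      · intro a ha
        have hne : a.1 ≠ kv.1 := fun e => hk (e ▸ List.mem_map_of_mem ha)
        rw [PySem.Dict.contains_insert]
        simp [hne]

lemma prio_keys (fields : List String) (d : PySem.Dict String String) :
    (fields.filterMap (fun f => (d.get? f).map (fun v => (f, v)))).map Prod.fst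
      = fields.filter (fun f => (d.get? f).isSome) := by
  induction fields with
  | nil => simp
  | cons f rest ih => cases hd : d.get? f <;> simp [hd, ih]

-- B's bucket loop: final bucket j holds exactly the pairs of rank j, in input order
lemma bucket_fold (g : (String × String) → Nat) (l : List (String × String))
    (bs : List (List (String × String))) (hg : ∀ kv, g kv < bs.length) :
    l.foldl (fun bs kv => bs.set (g kv) (bs.getD (g kv) [] ++ [kv])) bs
      = (List.range bs.length).map (fun j => bs.getD j [] ++ l.filter (fun kv => g kv == j)) := by
  induction l generalizing bs with
  | nil =>
    simp only [List.foldl_nil, List.filter_nil, List.append_nil]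
    apply List.ext_getElem (by simp)
    intro j hj hj'
    simp only [List.getElem_map, List.getElem_range]
    rw [List.getD_eq_getElem _ _ (by simpa using hj')]
  | cons kv t ih =>
    simp only [List.foldl_cons]
    rw [ih _ (by intro a; simpa using hg a)]
    have hlen : (bs.set (g kv) (bs.getD (g kv) [] ++ [kv])).length = bs.length := by simp
    rw [hlen]
    apply List.map_congr_left
    intro j hj
    have hj' : j < bs.length := List.mem_range.mp hj
    have hset : (bs.set (g kv) (bs.getD (g kv) [] ++ [kv])).getD j []
        = if j = g kv then bs.getD (g kv) [] ++ [kv] else bs.getD j [] := by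
      by_cases hji : j = g kv
      · subst hji; simp [List.getD_eq_getElem?_getD, hg kv]
      · simp [List.getD_eq_getElem?_getD, Ne.symm hji, hji]
    rw [hset, List.filter_cons]
    by_cases hji : j = g kv
    · subst hji; simp
    · rw [if_neg hji, if_neg (by simpa using Ne.symm hji)]

-- first-match lookup names the unique pair with that key
lemma filter_key (l : List (String × String)) (f : String) (h : (l.map Prod.fst).Nodup) :
    l.filter (fun kv => kv.1 == f) = (((PySem.Dict.mk l).get? f).map (fun v => (f, v))).toList := by
  induction l with
  | nil => rfl
  | cons a t ih =>
    obtain ⟨k, v⟩ := a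
    simp only [List.map_cons] at h
    obtain ⟨hk, ht⟩ := List.nodup_cons.mp h
    rw [List.filter_cons, PySem.Dict.get?_mk_cons]
    by_cases hkf : k = f
    · subst hkf
      rw [if_pos (by simp), if_pos (by simp)]
      have : t.filter (fun kv => kv.1 == k) = [] := by
        apply List.filter_eq_nil_iff.mpr
        intro kv hkv
        simp only [beq_iff_eq]
        exact fun e => hk (e ▸ List.mem_map_of_mem hkv)
      simp [this]
    · rw [if_neg (by simpa using hkf), if_neg (by simpa using hkf)]
      exact ih ht

lemma filterMap_toList_cons {α β : Type} (g : α → Option β) (f : α) (l : List α) :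
    (f :: l).filterMap g = (g f).toList ++ l.filterMap g := by
  cases h : g f <;> simp [h]

lemma fold1_contains (spec_dict : List (String × String)) (x : String)
    (hx : x ∈ spec_dict.map Prod.fst) :
    (pvPriorityFields.foldl (fun o field =>
        match (PySem.Dict.mk spec_dict).get? field with
        | some v => o.insert field v
        | none => o) PySem.Dict.empty).contains x = decide (x ∈ pvPriorityFields) := by
  have hsome : ((PySem.Dict.mk spec_dict).get? x).isSome = true := by
    rcases hq : (PySem.Dict.mk spec_dict).get? x with _ | v
    · exact absurd ((PySem.Dict.get?_eq_none_iff_not_mem_keys _ _).mp hq) (by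
        simp only [PySem.Dict.keys]
        exact fun hn => hn hx)
    · rfl
  rw [PySem.Dict.contains_eq_decide_mem_keys]
  have hk : (pvPriorityFields.foldl (fun o field =>
      match (PySem.Dict.mk spec_dict).get? field with
      | some v => o.insert field v
      | none => o) PySem.Dict.empty).keys
      = pvPriorityFields.filter (fun f => ((PySem.Dict.mk spec_dict).get? f).isSome) := by
    simp only [PySem.Dict.keys]
    rw [phase1_items pvPriorityFields (PySem.Dict.mk spec_dict) PySem.Dict.empty (by decide)
        (fun f _ => PySem.Dict.contains_empty f)]
    simpa using prio_keys pvPriorityFields (PySem.Dict.mk spec_dict)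
  rw [hk]
  simp [List.mem_filter, hsome]

lemma portA_canon (spec_dict : List (String × String)) (h : (spec_dict.map Prod.fst).Nodup)
    (hne : spec_dict.isEmpty = false) :
    reorder_car_spec spec_dict = pvCanon spec_dict := by
  simp only [reorder_car_spec, hne, Bool.false_eq_true, if_false]
  rw [phase2_items spec_dict _ h,
      phase1_items pvPriorityFields (PySem.Dict.mk spec_dict) PySem.Dict.empty (by decide)
        (fun f _ => PySem.Dict.contains_empty f),
      List.filter_congr (q := fun kv => !decide (kv.1 ∈ pvPriorityFields))
        (fun kv hkv => by rw [fold1_contains spec_dict kv.1 (List.mem_map_of_mem hkv)])]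
  simp [pvCanon, pvPrio, PySem.Dict.empty]

-- the keys of the canonical result are distinct
lemma canon_keys_nodup (spec_dict : List (String × String))
    (h : (spec_dict.map Prod.fst).Nodup) : ((pvCanon spec_dict).map Prod.fst).Nodup := by
  unfold pvCanon
  rw [List.map_append]
  apply List.Nodup.append
  · rw [pvPrio, prio_keys]
    exact (by decide : pvPriorityFields.Nodup).filter _
  · exact h.sublist (List.filter_sublist.map Prod.fst)
  · intro x hx1 hx2
    rw [pvPrio, prio_keys] at hx1
    obtain ⟨kv, hkv, rfl⟩ := List.mem_map.mp hx2
    have hq := (List.mem_filter.mp hkv).2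
    simp only [Bool.not_eq_eq_eq_not, Bool.not_true, decide_eq_false_iff_not] at hq
    exact hq (List.mem_of_mem_filter hx1)

-- bucket contents, bucket by bucket
lemma rk_bucket0 (x : String) : (pvRk x == 0) = (x == "Company") := by
  unfold pvRk; split_ifs with h1 h2 h3 h4 h5 h6 <;> simp_all
lemma rk_bucket1 (x : String) : (pvRk x == 1) = (x == "Brand") := by
  unfold pvRk; split_ifs with h1 h2 h3 h4 h5 h6 <;> simp_all
lemma rk_bucket2 (x : String) : (pvRk x == 2) = (x == "Model") := by
  unfold pvRk; split_ifs with h1 h2 h3 h4 h5 h6 <;> simp_all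
lemma rk_bucket3 (x : String) : (pvRk x == 3) = (x == "Serie") := by
  unfold pvRk; split_ifs with h1 h2 h3 h4 h5 h6 <;> simp_all
lemma rk_bucket4 (x : String) : (pvRk x == 4) = (x == "Production Years") := by
  unfold pvRk; split_ifs with h1 h2 h3 h4 h5 h6 <;> simp_all
lemma rk_bucket5 (x : String) : (pvRk x == 5) = (x == "Body style") := by
  unfold pvRk; split_ifs with h1 h2 h3 h4 h5 h6 <;> simp_all
lemma rk_bucket6 (x : String) : (pvRk x == 6) = !decide (x ∈ pvPriorityFields) := by
  unfold pvRk pvPriorityFields; split_ifs with h1 h2 h3 h4 h5 h6 <;> simp_all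

lemma portB_canon (spec_dict : List (String × String)) (h : (spec_dict.map Prod.fst).Nodup)
    (hne : spec_dict.isEmpty = false) :
    reorder_car_spec_alt spec_dict = pvCanon spec_dict := by
  simp only [reorder_car_spec_alt, hne, Bool.false_eq_true, if_false]
  have hfun : (fun (bs : List (List (String × String))) (kv : String × String) =>
      bs.set (pvRank.getD kv.1 6).toNat (bs.getD (pvRank.getD kv.1 6).toNat [] ++ [kv]))
      = (fun bs kv => bs.set (pvRk kv.1) (bs.getD (pvRk kv.1) [] ++ [kv])) := by
    funext bs kv; rw [rk_eq]
  rw [hfun, bucket_fold (fun kv => pvRk kv.1) spec_dict (List.replicate 7 [])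
      (fun kv => by simpa using rk_lt kv.1)]
  have hF : ((List.range (List.replicate 7 ([] : List (String × String))).length).map
      (fun j => (List.replicate 7 []).getD j [] ++
        spec_dict.filter (fun kv => pvRk kv.1 == j))).flatten = pvCanon spec_dict := by
    have hget : ∀ j : Nat, (List.replicate 7 ([] : List (String × String))).getD j [] = [] := by
      intro j
      simp only [List.getD_eq_getElem?_getD, List.getElem?_replicate]
      split_ifs <;> rfl
    simp only [List.length_replicate, hget, List.nil_append,
      show List.range 7 = [0, 1, 2, 3, 4, 5, 6] from rfl,
      List.map_cons, List.map_nil, List.flatten_cons, List.flatten_nil, List.append_nil]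
    rw [List.filter_congr (fun kv _ => rk_bucket0 kv.1), filter_key spec_dict "Company" h,
        List.filter_congr (fun kv _ => rk_bucket1 kv.1), filter_key spec_dict "Brand" h,
        List.filter_congr (fun kv _ => rk_bucket2 kv.1), filter_key spec_dict "Model" h,
        List.filter_congr (fun kv _ => rk_bucket3 kv.1), filter_key spec_dict "Serie" h,
        List.filter_congr (fun kv _ => rk_bucket4 kv.1), filter_key spec_dict "Production Years" h,
        List.filter_congr (fun kv _ => rk_bucket5 kv.1), filter_key spec_dict "Body style" h,
        List.filter_congr (fun kv _ => rk_bucket6 kv.1)]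
    unfold pvCanon pvPrio pvPriorityFields
    simp only [filterMap_toList_cons, List.filterMap_nil, List.append_nil, List.append_assoc]
  rw [hF, PySem.Dict.items_foldl_insert_fresh (pvCanon spec_dict) Prod.fst Prod.snd
      PySem.Dict.empty (fun a _ => PySem.Dict.contains_empty a.1) (canon_keys_nodup spec_dict h)]
  simp [PySem.Dict.empty]

-- ===== VERDICT (by name: the statement is the Claim_ definition above) =====
theorem reorder_car_spec_spec : Claim_equal_reorder_car_spec := by
  intro spec_dict _ hpre
  unfold Spec_reorder_car_spec
  by_cases hne : spec_dict.isEmpty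
  · simp [reorder_car_spec, reorder_car_spec_alt, hne]
  · rw [portA_canon spec_dict hpre (by simpa using hne),
        portB_canon spec_dict hpre (by simpa using hne)]
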